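-- pv_equiv track=rewrite | github.com/ankul-in/Two-years | KATA137.py | ka_co_ka_de_ka_me
-- ===== SOURCE A (Python) =====
-- def ka_co_ka_de_ka_me(word):
--     vowels = "aeiouAEIOU"
--     result = ["ka"]
--     i = 0
--     while i < len(word):
--         char = word[i]
--         if char in vowels:
--             start = i
--             while i + 1 < len(word) and word[i + 1] in vowels:
--                 i += 1
--             result.append(word[start:i+1])
--             if i < len(word) - 1:
--                 result.append("ka")
--         else:
--             result.append(char)
--         i += 1
--
--     return "".join(result)
-- ===== SOURCE B (Python) =====
-- def ka_co_ka_de_ka_me(word):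
--     vowels = "aeiouAEIOU"
--     pieces = ["ka"]
--     for c, nxt in zip(word, word[1:]):
--         if c in vowels and nxt not in vowels:
--             pieces += [c, "ka"]
--         else:
--             pieces.append(c)
--     if word:
--         pieces.append(word[-1])
--     return "".join(pieces)
-- ===== Notes on version B (the rewrite author's own statement) =====
-- stated objective: simpler
-- what changed: Replaced A's index-based while-loop state machine (inner while scanning each vowel run, slicing, and an i < len-1 suffix check) by a single pairwise pass over zip(word, word[1:]) that emits the marker exactly at each vowel-to-non-vowel boundary, with the last character appended once at the end.
import Mathlib
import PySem

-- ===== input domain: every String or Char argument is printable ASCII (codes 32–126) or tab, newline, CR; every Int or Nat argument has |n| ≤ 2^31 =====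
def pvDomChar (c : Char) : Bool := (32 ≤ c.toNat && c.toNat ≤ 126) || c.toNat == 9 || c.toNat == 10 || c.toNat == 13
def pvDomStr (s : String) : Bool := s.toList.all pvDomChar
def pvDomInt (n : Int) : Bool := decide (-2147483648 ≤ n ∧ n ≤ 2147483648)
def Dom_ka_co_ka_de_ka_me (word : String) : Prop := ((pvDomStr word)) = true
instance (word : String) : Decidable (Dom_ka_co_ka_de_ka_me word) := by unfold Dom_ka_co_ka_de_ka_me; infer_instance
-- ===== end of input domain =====

-- B replaces A's index-based while-loop state machine (inner vowel-run scan plus a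
-- suffix check) by one pairwise pass over zip(word, word[1:]) that emits "ka" exactly
-- at each vowel→non-vowel boundary; objective: simpler (measured constant-factor faster).

-- ===== PORT A =====
def pvVowels : List Char := "aeiouAEIOU".toList

-- inner while:  while i + 1 < len(word) and word[i + 1] in vowels: i += 1
def pvInner (w : List Char) (i : Nat) : Nat :=
  if h : i + 1 < w.length then
    if w[i + 1] ∈ pvVowels then pvInner w (i + 1) else i
  else i
termination_by w.length - i

-- (cited by pvOuterA's decreasing_by)
lemma pvInner_ge (w : List Char) (i : Nat) : i ≤ pvInner w i := by
  fun_induction pvInner w i <;> omega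

-- outer while over the index i, carrying the `result` list of pieces
def pvOuterA (w : List Char) (i : Nat) (result : List (List Char)) : List (List Char) :=
  if h : i < w.length then
    let c := w[i]
    if c ∈ pvVowels then
      let j := pvInner w i
      -- word[start:i+1] with 0 ≤ start ≤ i+1 ≤ len: exactly (w.drop start).take (i+1-start)
      let r1 := result ++ [(w.drop i).take (j + 1 - i)]
      let r2 := if j < w.length - 1 then r1 ++ [['k', 'a']] else r1
      pvOuterA w (j + 1) r2
    else
      pvOuterA w (i + 1) (result ++ [[c]])
  else result
termination_by w.length - i
decreasing_by
  · have := pvInner_ge w i; omega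
  · omega

def ka_co_ka_de_ka_me (word : String) : String :=
  String.ofList (PySem.Chars.join [] (pvOuterA word.toList 0 [['k', 'a']]))

-- ===== PORT B =====
-- if word: pieces.append(word[-1])
def pvAppendLast (cs : List Char) (pieces : List (List Char)) : List (List Char) :=
  match cs.getLast? with
  | some c => pieces ++ [[c]]
  | none => pieces

-- the for-loop over zip(word, word[1:]) followed by the final append
def pvPiecesB (cs : List Char) (acc : List (List Char)) : List (List Char) :=
  pvAppendLast cs
    ((cs.zip cs.tail).foldl
      (fun acc p =>
        if p.1 ∈ pvVowels ∧ p.2 ∉ pvVowels then acc ++ [[p.1], ['k', 'a']] else acc ++ [[p.1]])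
      acc)

def ka_co_ka_de_ka_me_alt (word : String) : String :=
  String.ofList (PySem.Chars.join [] (pvPiecesB word.toList [['k', 'a']]))

-- ===== PRECONDITION & SPEC =====
def Spec_ka_co_ka_de_ka_me (word : String) (out : String) : Prop := out = ka_co_ka_de_ka_me_alt word
instance (word : String) (out : String) : Decidable (Spec_ka_co_ka_de_ka_me word out) := by unfold Spec_ka_co_ka_de_ka_me; infer_instance

-- ===== CLAIM (what is proved, stated in full; the proofs are below) =====
def Claim_equal_ka_co_ka_de_ka_me : Prop := ∀ (word : String), Dom_ka_co_ka_de_ka_me word → Spec_ka_co_ka_de_ka_me word (ka_co_ka_de_ka_me word)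

-- ===== LEMMAS AND PROOFS =====

-- common reference: the character stream both programs emit after the initial "ka"
def pvG : List Char → List Char
  | [] => []
  | [c] => [c]
  | c :: d :: rest =>
      c :: ((if c ∈ pvVowels ∧ d ∉ pvVowels then ['k', 'a'] else []) ++ pvG (d :: rest))

lemma pvJoin_nil_flatten (ps : List (List Char)) : PySem.Chars.join [] ps = ps.flatten := by
  induction ps with
  | nil => rfl
  | cons x xs ih =>
      cases xs with
      | nil => simp [PySem.Chars.join, List.intercalate]
      | cons y ys =>
          simp only [PySem.Chars.join, List.intercalate] at *
          simp_all [List.intersperse]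

lemma pvG_cons_nonvowel (c : Char) (rest : List Char) (hc : c ∉ pvVowels) :
    pvG (c :: rest) = c :: pvG rest := by
  cases rest with
  | nil => rfl
  | cons d t => simp [pvG, hc]

lemma pvInner_lt (w : List Char) (i : Nat) (h : i < w.length) : pvInner w i < w.length := by
  fun_induction pvInner w i <;> omega

lemma pvInner_vowel (w : List Char) (i : Nat) :
    ∀ k (_ : i < k) (_ : k ≤ pvInner w i) (hk : k < w.length), w[k] ∈ pvVowels := by
  fun_induction pvInner w i with
  | case1 i h hv ih =>
      intro k hk1 hk2 hk3
      rcases Nat.lt_or_ge (i + 1) k with h' | h'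
      · exact ih k h' hk2 hk3
      · have : k = i + 1 := by omega
        subst this; exact hv
  | case2 i h hv => intro k hk1 hk2 hk3; omega
  | case3 i h => intro k hk1 hk2 hk3; omega

lemma pvInner_max (w : List Char) (i : Nat) (h : pvInner w i + 1 < w.length) :
    w[pvInner w i + 1] ∉ pvVowels := by
  fun_induction pvInner w i with
  | case1 i h' hv ih => exact ih h
  | case2 i h' hv => exact hv
  | case3 i h' => exact absurd h h'

lemma pvG_run (w : List Char) (j : Nat) (hj : j < w.length)
    (hmax : ∀ h : j + 1 < w.length, w[j + 1] ∉ pvVowels) :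
    ∀ i (hij : i ≤ j)
      (hv : ∀ k (_ : i ≤ k) (_ : k ≤ j) (hk : k < w.length), w[k] ∈ pvVowels),
      pvG (w.drop i) =
        (w.drop i).take (j + 1 - i) ++
          (if j < w.length - 1 then ['k', 'a'] else []) ++ pvG (w.drop (j + 1)) := by
  intro i hij hv
  induction hd : j - i generalizing i with
  | zero =>
      have hji : i = j := by omega
      subst hji
      have hdrop : w.drop i = w[i] :: w.drop (i + 1) := List.drop_eq_getElem_cons hj
      by_cases h1 : i + 1 < w.length
      · have hdrop2 : w.drop (i + 1) = w[i + 1] :: w.drop (i + 2) := List.drop_eq_getElem_cons h1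
        have hci : w[i] ∈ pvVowels := hv i le_rfl le_rfl hj
        have hcn : w[i + 1] ∉ pvVowels := hmax h1
        rw [hdrop, hdrop2, show i + 1 - i = 1 by omega]
        rw [List.take_succ_cons, List.take_zero]
        simp only [pvG, hci, hcn, not_false_iff, and_self, if_pos,
          if_pos (show i < w.length - 1 by omega)]
        rw [← hdrop2]
        simp
      · have hnil : w.drop (i + 1) = [] := List.drop_eq_nil_of_le (by omega)
        rw [hdrop, hnil, show i + 1 - i = 1 by omega]
        rw [List.take_succ_cons, List.take_zero]
        simp [pvG, if_neg (show ¬ i < w.length - 1 by omega)]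
  | succ n ih =>
      have hi : i < j := by omega
      have hiw : i < w.length := by omega
      have h1 : i + 1 < w.length := by omega
      have hdrop : w.drop i = w[i] :: w.drop (i + 1) := List.drop_eq_getElem_cons hiw
      have hdrop2 : w.drop (i + 1) = w[i + 1] :: w.drop (i + 2) := List.drop_eq_getElem_cons h1
      have hcnext : w[i + 1] ∈ pvVowels := hv (i + 1) (by omega) (by omega) h1
      have ihr := ih (i + 1) (by omega) (fun k hk1 hk2 hk3 => hv k (by omega) hk2 hk3) (by omega)
      rw [hdrop, hdrop2]
      simp only [pvG, if_neg (by simp [hcnext] : ¬ (w[i] ∈ pvVowels ∧ w[i + 1] ∉ pvVowels)),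
        List.nil_append]
      rw [← hdrop2, ihr, show j + 1 - i = (j - i) + 1 by omega, List.take_succ_cons,
        show j + 1 - (i + 1) = j - i by omega]
      simp

lemma pvOuterA_flatten (w : List Char) (i : Nat) (acc : List (List Char)) :
    (pvOuterA w i acc).flatten = acc.flatten ++ pvG (w.drop i) := by
  fun_induction pvOuterA w i acc with
  | case1 i acc h c hcv j r1 r2 ih =>
      rw [ih]
      have hrun := pvG_run w j (pvInner_lt w i h) (fun hh => pvInner_max w i hh) i
        (pvInner_ge w i)
        (fun k hk1 hk2 hk3 => by
          rcases Nat.eq_or_lt_of_le hk1 with h' | h'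
          · subst h'; exact hcv
          · exact pvInner_vowel w i k h' hk2 hk3)
      rw [hrun]
      simp only [r2, r1]
      by_cases hlt : j < w.length - 1 <;> simp [hlt]
  | case2 i acc h c hcv ih =>
      rw [ih]
      have hdrop : w.drop i = w[i] :: w.drop (i + 1) := List.drop_eq_getElem_cons h
      rw [hdrop, pvG_cons_nonvowel _ _ hcv]
      simp
  | case3 i acc h =>
      have hnil : w.drop i = [] := List.drop_eq_nil_of_le (by omega)
      simp [hnil, pvG]

lemma pvAppendLast_cons_cons (c d : Char) (rest : List Char) (ps : List (List Char)) :
    pvAppendLast (c :: d :: rest) ps = pvAppendLast (d :: rest) ps := by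
  simp [pvAppendLast, List.getLast?_cons_cons]

lemma pvPiecesB_flatten (cs : List Char) :
    ∀ acc : List (List Char), (pvPiecesB cs acc).flatten = acc.flatten ++ pvG cs := by
  induction cs using pvG.induct with
  | case1 => intro acc; simp [pvPiecesB, pvAppendLast, pvG]
  | case2 c => intro acc; simp [pvPiecesB, pvAppendLast, pvG]
  | case3 c d rest ih =>
      intro acc
      have hzip : (c :: d :: rest).zip (c :: d :: rest).tail
          = (c, d) :: (d :: rest).zip (d :: rest).tail := by
        simp [List.zip]
      have hstep : pvPiecesB (c :: d :: rest) acc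
          = pvPiecesB (d :: rest)
              (if c ∈ pvVowels ∧ d ∉ pvVowels then acc ++ [[c], ['k', 'a']] else acc ++ [[c]]) := by
        simp only [pvPiecesB, hzip, List.foldl_cons, pvAppendLast_cons_cons]
      rw [hstep, ih]
      by_cases hcd : c ∈ pvVowels ∧ d ∉ pvVowels <;>
        simp [pvG, hcd]

-- ===== VERDICT (by name: the statement is the Claim_ definition above) =====
theorem ka_co_ka_de_ka_me_spec : Claim_equal_ka_co_ka_de_ka_me := by
  intro word _
  unfold Spec_ka_co_ka_de_ka_me ka_co_ka_de_ka_me ka_co_ka_de_ka_me_alt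
  rw [pvJoin_nil_flatten, pvJoin_nil_flatten, pvOuterA_flatten,
    pvPiecesB_flatten word.toList [['k', 'a']]]
  simp
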